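-- pv_equiv track=rewrite | github.com/dsobczynski88/aiswre | aiswre/promptengg/prompt_evaluation.py | eval_has_vague_terms
-- ===== SOURCE A (Python) =====
-- def add_spaces(x: str) -> str:
--     return x
--
-- def eval_has_vague_terms(text: str) -> bool:
--     """
--     R7: Criteria from 4.1.7 INCOSE Guide to Writing Requirements:
--         check if text contains vague terms
--     """
--     vague_terms = [
--         "some", "any", "allowable", "several", "many", "a lot of", "a few", "almost always",
--         "very nearly", "nearly", "about", "close to", "almost","approximate","ancillary", "relevant",
--         "routine", "common", "generic", "significant","flexible", "expandable", "typical", "sufficient",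
--         "adequate", "appropriate", "efficient", "effective", "proficient", "reasonable","customary",
--         "usually", "approximately", "sufficiently","typically"
--     ]
--     for term in vague_terms:
--         if add_spaces(term) in text:
--             return True
--     else:
--         return False
-- ===== SOURCE B (Python) =====
-- _VAGUE = ("some,any,allowable,several,many,a lot of,a few,almost always,"
--           "very nearly,nearly,about,close to,almost,approximate,ancillary,relevant,"
--           "routine,common,generic,significant,flexible,expandable,typical,sufficient,"
--           "adequate,appropriate,efficient,effective,proficient,reasonable,customary,"
--           "usually,approximately,sufficiently,typically").split(",")
--
-- def eval_has_vague_terms(text: str) -> bool: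
--     # single left-to-right pass over positions: at each position test whether
--     # some vague term starts there, instead of per-term whole-text scans
--     i, n = 0, len(text)
--     while i < n:
--         if any(text.startswith(t, i) for t in _VAGUE):
--             return True
--         i += 1
--     return False
-- ===== Notes on version B (the rewrite author's own statement) =====
-- stated objective: alternative
-- what changed: B scans text positions once left-to-right (suffix recursion) testing at each position whether some vague term starts there, with the term list derived by splitting one CSV string, instead of A's per-term whole-text substring scans.
import Mathlib
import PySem

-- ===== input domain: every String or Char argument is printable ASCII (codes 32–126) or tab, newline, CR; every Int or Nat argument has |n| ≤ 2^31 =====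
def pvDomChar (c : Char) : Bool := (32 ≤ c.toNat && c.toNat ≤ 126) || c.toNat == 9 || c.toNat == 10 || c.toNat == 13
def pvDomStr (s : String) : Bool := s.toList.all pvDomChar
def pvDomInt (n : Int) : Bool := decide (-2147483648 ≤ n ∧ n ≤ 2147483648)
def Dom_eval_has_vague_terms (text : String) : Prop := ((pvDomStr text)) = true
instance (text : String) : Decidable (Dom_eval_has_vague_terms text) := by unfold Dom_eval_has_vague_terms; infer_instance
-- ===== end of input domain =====

-- B replaces A's per-term whole-text substring scans by one left-to-right pass over text
-- positions (a structural recursion over the suffixes), testing at each position whether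
-- some vague term starts there; the term list is derived by splitting one CSV string (alternative).


-- ===== PORT A =====
def vagueTermsA : List String := [
  "some", "any", "allowable", "several", "many", "a lot of", "a few", "almost always",
  "very nearly", "nearly", "about", "close to", "almost", "approximate", "ancillary", "relevant",
  "routine", "common", "generic", "significant", "flexible", "expandable", "typical", "sufficient",
  "adequate", "appropriate", "efficient", "effective", "proficient", "reasonable", "customary",
  "usually", "approximately", "sufficiently", "typically"]

-- add_spaces is the identity, so 'add_spaces(term) in text' is 'term in text';
-- the for/else loop returning True on the first hit is List.any
def eval_has_vague_terms (text : String) : Bool :=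
  vagueTermsA.any (fun term => PySem.Str.isIn term text)

-- ===== PORT B =====
-- _VAGUE = "<csv>".split(",")
def vagueCSV : String :=
  "some,any,allowable,several,many,a lot of,a few,almost always,very nearly,nearly,about,close to,almost,approximate,ancillary,relevant,routine,common,generic,significant,flexible,expandable,typical,sufficient,adequate,appropriate,efficient,effective,proficient,reasonable,customary,usually,approximately,sufficiently,typically"

def vagueTermsB : List (List Char) := PySem.Chars.splitOn vagueCSV.toList [',']

-- the while-loop over positions i: 'text.startswith(t, i)' is startswith on the i-th suffix,
-- so the loop is a structural recursion over the suffixes of text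
def scanVague : List Char → Bool
  | [] => false
  | c :: rest =>
      vagueTermsB.any (fun t => PySem.Chars.startswith (c :: rest) t) || scanVague rest

def eval_has_vague_terms_alt (text : String) : Bool := scanVague text.toList

-- ===== PRECONDITION & SPEC =====
def Spec_eval_has_vague_terms (text : String) (out : Bool) : Prop := out = eval_has_vague_terms_alt text
instance (text : String) (out : Bool) : Decidable (Spec_eval_has_vague_terms text out) := by unfold Spec_eval_has_vague_terms; infer_instance

-- ===== CLAIM (what is proved, stated in full; the proofs are below) =====
def Claim_equal_eval_has_vague_terms : Prop := ∀ (text : String), Dom_eval_has_vague_terms text → Spec_eval_has_vague_terms text (eval_has_vague_terms text)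

-- ===== LEMMAS AND PROOFS =====

set_option maxRecDepth 8000 in
theorem vagueTermsB_eq : vagueTermsB = vagueTermsA.map String.toList := by decide

set_option maxRecDepth 8000 in
theorem vagueTermsB_nonempty : ∀ t ∈ vagueTermsB, t ≠ [] := by decide

-- B's suffix scan finds a term iff some term is a substring
theorem scanVague_iff (s : List Char) :
    scanVague s = true ↔ ∃ t ∈ vagueTermsB, PySem.Chars.isIn t s = true := by
  induction s with
  | nil =>
    simp only [scanVague, PySem.Chars.isIn_iff_infix]
    refine ⟨fun h => absurd h (by simp), ?_⟩
    rintro ⟨t, ht, h⟩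
    exact absurd (List.eq_nil_of_infix_nil h) (vagueTermsB_nonempty t ht)
  | cons c rest ih =>
    simp only [scanVague, Bool.or_eq_true, List.any_eq_true, ih,
      PySem.Chars.isIn_iff_infix, PySem.Chars.startswith_iff, List.infix_cons_iff]
    constructor
    · rintro (⟨t, ht, h⟩ | ⟨t, ht, h⟩)
      · exact ⟨t, ht, Or.inl h⟩
      · exact ⟨t, ht, Or.inr h⟩
    · rintro ⟨t, ht, h | h⟩
      · exact Or.inl ⟨t, ht, h⟩
      · exact Or.inr ⟨t, ht, h⟩

-- ===== VERDICT (by name: the statement is the Claim_ definition above) =====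
theorem eval_has_vague_terms_spec : Claim_equal_eval_has_vague_terms := by
  intro text _
  unfold Spec_eval_has_vague_terms eval_has_vague_terms eval_has_vague_terms_alt
  rw [Bool.eq_iff_iff, scanVague_iff, vagueTermsB_eq]
  simp only [List.any_eq_true, PySem.Str.isIn_eq, List.mem_map]
  constructor
  · rintro ⟨term, hmem, h⟩
    exact ⟨term.toList, ⟨term, hmem, rfl⟩, h⟩
  · rintro ⟨t, ⟨term, hmem, rfl⟩, h⟩
    exact ⟨term, hmem, h⟩
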